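-- pv_equiv track=rewrite | github.com/sangminsang/mahjong_yolo_project | apis/score/logic.py | is_ryanpeiko
-- ===== SOURCE A (Python) =====
-- def is_ryanpeiko(bodies):
--     """량페코 판정"""
--     # 슌쯔만 추출
--     shuntsu = [body for body in bodies if len(body) == 3 and body[0] != body[1]]
--
--     # 같은 슌쯔 쌍이 2개 있는지 확인
--     if len(shuntsu) < 4:
--         return False
--
--     pairs = []
--     used = set()
--     for i in range(len(shuntsu)):
--         if i in used:
--             continue
--         for j in range(i + 1, len(shuntsu)):
--             if j in used:
--                 continue
--             if shuntsu[i] == shuntsu[j]: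
--                 pairs.append((i, j))
--                 used.add(i)
--                 used.add(j)
--                 break
--
--     return len(pairs) == 2
-- ===== SOURCE B (Python) =====
-- def is_ryanpeiko(bodies):
--     """량페코 판정"""
--     counts = {}
--     for body in bodies:
--         if len(body) == 3 and body[0] != body[1]:
--             key = tuple(body)
--             counts[key] = counts.get(key, 0) + 1
--     return sum(c // 2 for c in counts.values()) == 2
-- ===== Notes on version B (the rewrite author's own statement) =====
-- stated objective: simpler
-- what changed: Replaces the quadratic nested greedy index-pairing with a used-set (and the redundant len<4 guard) by a single counting pass over a dict of shuntsu multiplicities, returning whether the total number of disjoint identical pairs, sum(c // 2), equals 2.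
import Mathlib
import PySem

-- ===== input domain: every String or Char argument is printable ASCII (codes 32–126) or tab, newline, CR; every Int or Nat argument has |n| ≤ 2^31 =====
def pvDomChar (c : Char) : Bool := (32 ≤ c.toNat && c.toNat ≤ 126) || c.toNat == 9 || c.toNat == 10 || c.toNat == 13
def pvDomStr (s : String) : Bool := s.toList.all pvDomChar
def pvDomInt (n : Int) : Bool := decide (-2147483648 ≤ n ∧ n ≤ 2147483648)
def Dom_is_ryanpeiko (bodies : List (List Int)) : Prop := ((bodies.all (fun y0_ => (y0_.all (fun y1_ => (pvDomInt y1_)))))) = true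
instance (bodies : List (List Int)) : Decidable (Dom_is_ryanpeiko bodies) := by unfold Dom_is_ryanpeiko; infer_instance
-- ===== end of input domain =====

-- B replaces A's quadratic nested greedy index-pairing (with a used-set and a redundant len<4 guard)
-- by one counting pass over a dict of shuntsu multiplicities: simpler, same return value everywhere.

-- ===== PORT A =====
-- inner `for j in range(i+1, …)` loop with its break, step for step
def pvInnerA (shuntsu : List (List Int)) (i : Int) (js : List Int)
    (pairs : List (Int × Int)) (used : PySem.Set Int) : List (Int × Int) × PySem.Set Int :=
  match js with
  | [] => (pairs, used)
  | j :: rest =>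
    if PySem.Set.contains used j then pvInnerA shuntsu i rest pairs used
    else if PySem.List.pyGetD shuntsu i [] == PySem.List.pyGetD shuntsu j [] then
      (pairs ++ [(i, j)], PySem.Set.add (PySem.Set.add used i) j)
    else pvInnerA shuntsu i rest pairs used

-- indices produced by range(len) are in range, so xs[i] is exact as pyGetD with any default
def is_ryanpeiko (bodies : List (List Int)) : Bool :=
  let shuntsu := bodies.filter (fun body =>
    PySem.List.len body == 3 && !(PySem.List.pyGetD body 0 0 == PySem.List.pyGetD body 1 0))
  if PySem.List.len shuntsu < 4 then false
  else
    let st := (PySem.List.pyRange 0 (PySem.List.len shuntsu)).foldl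
      (fun (st : List (Int × Int) × PySem.Set Int) i =>
        if PySem.Set.contains st.2 i then st
        else pvInnerA shuntsu i (PySem.List.pyRange (i + 1) (PySem.List.len shuntsu)) st.1 st.2)
      ([], PySem.Set.empty)
    PySem.List.len st.1 == 2

-- ===== PORT B =====
def is_ryanpeiko_alt (bodies : List (List Int)) : Bool :=
  let counts := bodies.foldl
    (fun (d : PySem.Dict (List Int) Int) body =>
      if PySem.List.len body == 3 && !(PySem.List.pyGetD body 0 0 == PySem.List.pyGetD body 1 0) then
        d.insert body (d.getD body 0 + 1)
      else d)
    PySem.Dict.empty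
  ((PySem.Dict.values counts).map (fun c => PySem.Int.floordiv c 2)).sum == 2

-- ===== PRECONDITION & SPEC =====
def Spec_is_ryanpeiko (bodies : List (List Int)) (out : Bool) : Prop := out = is_ryanpeiko_alt bodies
instance (bodies : List (List Int)) (out : Bool) : Decidable (Spec_is_ryanpeiko bodies out) := by unfold Spec_is_ryanpeiko; infer_instance

-- ===== CLAIM (what is proved, stated in full; the proofs are below) =====
def Claim_equal_is_ryanpeiko : Prop := ∀ (bodies : List (List Int)), Dom_is_ryanpeiko bodies → Spec_is_ryanpeiko bodies (is_ryanpeiko bodies)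

-- ===== LEMMAS AND PROOFS =====

-- greedy pair count, structurally: pair the head with the first later equal element
def pcnt : List (List Int) → Nat
  | [] => 0
  | x :: xs => if h : x ∈ xs then 1 + pcnt (xs.erase x) else pcnt xs
termination_by l => l.length
decreasing_by
  · rw [List.length_erase_of_mem h]; simp [List.length_cons]
  · simp [List.length_cons]

lemma pcnt_cons (x : List Int) (xs : List (List Int)) :
    pcnt (x :: xs) = if x ∈ xs then 1 + pcnt (xs.erase x) else pcnt xs := by
  rw [pcnt]; by_cases h : x ∈ xs <;> simp [h]

-- values of the still-free indices, in index order
def pvFree (s : List (List Int)) (U : PySem.Set Int) (js : List Int) : List (List Int) :=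
  (js.filter (fun j => !(PySem.Set.contains U j))).map (fun j => PySem.List.pyGetD s j [])

lemma pvInnerA_used_mono (s : List (List Int)) (i : Int) :
    ∀ (js : List Int) (U : PySem.Set Int) (pairs : List (Int × Int)) (x : Int),
      x ∈ U → x ∈ (pvInnerA s i js pairs U).2 := by
  intro js
  induction js with
  | nil => intro U pairs x hx; simpa [pvInnerA] using hx
  | cons j rest ih =>
    intro U pairs x hx
    simp only [pvInnerA]
    split
    · exact ih U pairs x hx
    · split
      · simp only [PySem.Set.mem_add]; tauto
      · exact ih U pairs x hx

lemma pvInnerA_used_bound (s : List (List Int)) (i : Int) :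
    ∀ (js : List Int) (U : PySem.Set Int) (pairs : List (Int × Int)) (x : Int),
      x ∈ (pvInnerA s i js pairs U).2 → x ∈ U ∨ x = i ∨ x ∈ js := by
  intro js
  induction js with
  | nil => intro U pairs x hx; simp [pvInnerA] at hx; tauto
  | cons j rest ih =>
    intro U pairs x hx
    simp only [pvInnerA] at hx
    split at hx
    · rcases ih U pairs x hx with h | h | h <;> simp [h]
    · split at hx
      · simp only [PySem.Set.mem_add] at hx
        rcases hx with (h | h) | h <;> simp [h]
      · rcases ih U pairs x hx with h | h | h <;> simp [h]

lemma pvInnerA_spec (s : List (List Int)) (i : Int) :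
    ∀ (js : List Int) (U : PySem.Set Int) (pairs : List (Int × Int)),
      i ∉ js → js.Nodup →
      ((pvInnerA s i js pairs U).1.length
         = pairs.length + (if PySem.List.pyGetD s i [] ∈ pvFree s U js then 1 else 0)) ∧
      pvFree s (pvInnerA s i js pairs U).2 js
         = (if PySem.List.pyGetD s i [] ∈ pvFree s U js
            then (pvFree s U js).erase (PySem.List.pyGetD s i []) else pvFree s U js) := by
  intro js
  induction js with
  | nil =>
    intro U pairs hi hnd
    simp [pvInnerA, pvFree]
  | cons j rest ih =>
    intro U pairs hi hnd
    have hij : i ≠ j := fun e => hi (e ▸ List.mem_cons_self)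
    have hir : i ∉ rest := fun hm => hi (List.mem_cons_of_mem j hm)
    have hjr : j ∉ rest := (List.nodup_cons.mp hnd).1
    have hndr : rest.Nodup := (List.nodup_cons.mp hnd).2
    cases hU : PySem.Set.contains U j with
    | true =>
      have hUmem : j ∈ U := (PySem.Set.contains_iff U j).mp hU
      have hfv : pvFree s U (j :: rest) = pvFree s U rest := by
        simp [pvFree, hUmem]
      obtain ⟨h1, h2⟩ := ih U pairs hir hndr
      have hmem : j ∈ (pvInnerA s i rest pairs U).2 :=
        pvInnerA_used_mono s i rest U pairs j ((PySem.Set.contains_iff U j).mp hU)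
      have hc2 : PySem.Set.contains (pvInnerA s i rest pairs U).2 j = true :=
        (PySem.Set.contains_iff _ j).mpr hmem
      have hfv2 : pvFree s (pvInnerA s i rest pairs U).2 (j :: rest)
           = pvFree s (pvInnerA s i rest pairs U).2 rest := by
        simp [pvFree, hmem]
      constructor
      · simp only [pvInnerA, hU, reduceIte]
        rw [hfv]; exact h1
      · simp only [pvInnerA, hU, reduceIte]
        rw [hfv, hfv2]; exact h2
    | false =>
      have hUm : j ∉ U := fun hm => absurd (hU ▸ (PySem.Set.contains_iff U j).mpr hm) Bool.false_ne_true
      have hfv : pvFree s U (j :: rest)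
           = PySem.List.pyGetD s j [] :: pvFree s U rest := by
        simp [pvFree, hUm]
      cases hv : (PySem.List.pyGetD s i [] == PySem.List.pyGetD s j []) with
      | true =>
        have hveq : PySem.List.pyGetD s i [] = PySem.List.pyGetD s j [] := eq_of_beq hv
        have hmemU' : ∀ k ∈ rest,
            (k ∈ PySem.Set.add (PySem.Set.add U i) j) ↔ (k ∈ U) := by
          intro k hk
          have hki : k ≠ i := fun e => hir (e ▸ hk)
          have hkj : k ≠ j := fun e => hjr (e ▸ hk)
          simp [PySem.Set.mem_add, hki, hkj]
        have hjmem : j ∈ PySem.Set.add (PySem.Set.add U i) j := by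
          simp [PySem.Set.mem_add]
        have hfv' : pvFree s (PySem.Set.add (PySem.Set.add U i) j) (j :: rest)
             = pvFree s U rest := by
          simp only [pvFree, List.filter_cons]
          rw [if_neg (by simp [hjmem])]
          congr 1
          exact List.filter_congr (by intro k hk; simp [hmemU' k hk])
        have hmem : PySem.List.pyGetD s i [] ∈ pvFree s U (j :: rest) := by
          rw [hfv, hveq]; exact List.mem_cons_self
        constructor
        · simp only [pvInnerA, hU, hv, Bool.false_eq_true, reduceIte]
          simp [hmem]
        · simp only [pvInnerA, hU, hv, Bool.false_eq_true, reduceIte]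
          simp only [if_pos hmem]
          rw [hfv', hfv, hveq, List.erase_cons_head]
      | false =>
        have hvne : PySem.List.pyGetD s i [] ≠ PySem.List.pyGetD s j [] :=
          fun e => by simp [e] at hv
        obtain ⟨h1, h2⟩ := ih U pairs hir hndr
        have hmemiff : (PySem.List.pyGetD s i [] ∈ pvFree s U (j :: rest))
             ↔ (PySem.List.pyGetD s i [] ∈ pvFree s U rest) := by
          rw [hfv]; simp [hvne]
        have hjR : j ∉ (pvInnerA s i rest pairs U).2 := by
          intro hm
          rcases pvInnerA_used_bound s i rest U pairs j hm with h | h | h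
          · exact hUm h
          · exact hij h.symm
          · exact hjr h
        have hfvR : pvFree s (pvInnerA s i rest pairs U).2 (j :: rest)
             = PySem.List.pyGetD s j [] :: pvFree s (pvInnerA s i rest pairs U).2 rest := by
          simp [pvFree, hjR]
        constructor
        · simp only [pvInnerA, hU, hv, Bool.false_eq_true, reduceIte]
          by_cases hm : PySem.List.pyGetD s i [] ∈ pvFree s U rest
          · rw [if_pos (hmemiff.mpr hm)]
            rw [h1, if_pos hm]
          · rw [if_neg (fun hc => hm (hmemiff.mp hc))]
            rw [h1, if_neg hm]
        · simp only [pvInnerA, hU, hv, Bool.false_eq_true, reduceIte]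
          rw [hfvR, h2, hfv]
          by_cases hm : PySem.List.pyGetD s i [] ∈ pvFree s U rest
          · rw [if_pos hm, if_pos (by simp [hvne, hm])]
            rw [List.erase_cons_tail (by simp [Ne.symm hvne])]
          · rw [if_neg hm, if_neg (by simp [hvne, hm])]

lemma pyRange_nodup : ∀ (m : Nat) (k b : Int), b ≤ k + m → (PySem.List.pyRange k b).Nodup := by
  intro m
  induction m with
  | zero =>
    intro k b h
    have he : PySem.List.pyRange k b = [] := by
      refine List.eq_nil_iff_forall_not_mem.mpr ?_
      intro x hx; rw [PySem.List.mem_pyRange_one] at hx; omega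
    simp [he]
  | succ m ih =>
    intro k b h
    by_cases hk : k < b
    · rw [PySem.List.pyRange_one_cons hk]
      refine List.nodup_cons.mpr ⟨?_, ih (k + 1) b (by push_cast at h ⊢; omega)⟩
      intro hx; rw [PySem.List.mem_pyRange_one] at hx; omega
    · have he : PySem.List.pyRange k b = [] := by
        refine List.eq_nil_iff_forall_not_mem.mpr ?_
        intro x hx; rw [PySem.List.mem_pyRange_one] at hx; omega
      simp [he]

lemma pvOuter_spec (s : List (List Int)) :
    ∀ (m : Nat) (k : Int) (pairs : List (Int × Int)) (U : PySem.Set Int),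
      (s.length : Int) ≤ k + m →
      (((PySem.List.pyRange k (s.length : Int)).foldl
          (fun (st : List (Int × Int) × PySem.Set Int) i =>
            if PySem.Set.contains st.2 i then st
            else pvInnerA s i (PySem.List.pyRange (i + 1) (s.length : Int)) st.1 st.2)
          (pairs, U)).1.length
        = pairs.length + pcnt (pvFree s U (PySem.List.pyRange k (s.length : Int)))) := by
  intro m
  induction m with
  | zero =>
    intro k pairs U h
    have he : PySem.List.pyRange k (s.length : Int) = [] := by
      refine List.eq_nil_iff_forall_not_mem.mpr ?_
      intro x hx; rw [PySem.List.mem_pyRange_one] at hx; omega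
    simp [he, pvFree, pcnt]
  | succ m ih =>
    intro k pairs U h
    by_cases hk : k < (s.length : Int)
    · rw [PySem.List.pyRange_one_cons hk, List.foldl_cons]
      cases hU : PySem.Set.contains U k with
      | true =>
        have hUmem : k ∈ U := (PySem.Set.contains_iff U k).mp hU
        simp only [reduceIte]
        have hfv : pvFree s U (k :: PySem.List.pyRange (k + 1) (s.length : Int))
             = pvFree s U (PySem.List.pyRange (k + 1) (s.length : Int)) := by
          simp [pvFree, hUmem]
        rw [hfv]
        exact ih (k + 1) pairs U (by push_cast at h ⊢; omega)
      | false =>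
        have hUmem : k ∉ U := fun hm =>
          absurd (hU ▸ (PySem.Set.contains_iff U k).mpr hm) Bool.false_ne_true
        simp only [Bool.false_eq_true, reduceIte]
        have hnotin : k ∉ PySem.List.pyRange (k + 1) (s.length : Int) := by
          intro hx; rw [PySem.List.mem_pyRange_one] at hx; omega
        have hnd : (PySem.List.pyRange (k + 1) (s.length : Int)).Nodup :=
          pyRange_nodup m (k + 1) _ (by push_cast at h ⊢; omega)
        obtain ⟨h1, h2⟩ :=
          pvInnerA_spec s k (PySem.List.pyRange (k + 1) (s.length : Int)) U pairs hnotin hnd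
        have hih := ih (k + 1)
          (pvInnerA s k (PySem.List.pyRange (k + 1) (s.length : Int)) pairs U).1
          (pvInnerA s k (PySem.List.pyRange (k + 1) (s.length : Int)) pairs U).2
          (by push_cast at h ⊢; omega)
        rw [Prod.mk.eta] at hih
        rw [hih, h1, h2]
        have hfv : pvFree s U (k :: PySem.List.pyRange (k + 1) (s.length : Int))
             = PySem.List.pyGetD s k [] :: pvFree s U (PySem.List.pyRange (k + 1) (s.length : Int)) := by
          simp [pvFree, hUmem]
        rw [hfv, pcnt_cons]
        by_cases hm : PySem.List.pyGetD s k [] ∈ pvFree s U (PySem.List.pyRange (k + 1) (s.length : Int))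
        · rw [if_pos hm, if_pos hm, if_pos hm]
          omega
        · rw [if_neg hm, if_neg hm, if_neg hm]
          omega
    · have he : PySem.List.pyRange k (s.length : Int) = [] := by
        refine List.eq_nil_iff_forall_not_mem.mpr ?_
        intro x hx; rw [PySem.List.mem_pyRange_one] at hx; omega
      simp [he, pvFree, pcnt]

lemma pcnt_le (l : List (List Int)) : 2 * pcnt l ≤ l.length := by
  induction l using pcnt.induct with
  | case1 => simp [pcnt]
  | case2 x xs h ih =>
    rw [pcnt_cons, if_pos h]
    have h1 : (xs.erase x).length = xs.length - 1 := List.length_erase_of_mem h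
    have h2 : 1 ≤ xs.length := List.length_pos_of_mem h
    simp only [List.length_cons]
    omega
  | case3 x xs h ih =>
    rw [pcnt_cons, if_neg h]
    simp only [List.length_cons]
    omega

lemma pcnt_eq_sum (l : List (List Int)) :
    ∑ v ∈ l.toFinset, l.count v / 2 = pcnt l := by
  induction l using pcnt.induct with
  | case1 => simp [pcnt]
  | case2 x xs h ih =>
    rw [pcnt_cons, if_pos h, ← ih]
    have hsub : (xs.erase x).toFinset ⊆ xs.toFinset := by
      intro v hv
      rw [List.mem_toFinset] at hv ⊢
      exact List.mem_of_mem_erase hv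
    have hzero : ∀ v ∈ xs.toFinset, v ∉ (xs.erase x).toFinset → (xs.erase x).count v / 2 = 0 := by
      intro v _ hv
      rw [List.mem_toFinset] at hv
      rw [List.count_eq_zero.mpr hv]
    rw [Finset.sum_subset hsub hzero]
    have hx : x ∈ xs.toFinset := List.mem_toFinset.mpr h
    have hcons : (x :: xs).toFinset = xs.toFinset := by
      rw [List.toFinset_cons, Finset.insert_eq_self.mpr hx]
    rw [hcons]
    rw [← Finset.add_sum_erase _ _ hx, ← Finset.add_sum_erase _ _ hx]
    have hcong : ∀ v ∈ xs.toFinset.erase x,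
        (x :: xs).count v / 2 = (xs.erase x).count v / 2 := by
      intro v hv
      have hne : v ≠ x := (Finset.mem_erase.mp hv).1
      rw [List.count_erase_of_ne hne]
      simp [Ne.symm hne]
    rw [Finset.sum_congr rfl hcong]
    have hk : 1 ≤ xs.count x := List.count_pos_iff.mpr h
    have e1 : (x :: xs).count x = xs.count x + 1 := List.count_cons_self
    have e2 : (xs.erase x).count x = xs.count x - 1 := List.count_erase_self
    rw [e1, e2]
    omega
  | case3 x xs h ih =>
    rw [pcnt_cons, if_neg h, ← ih]
    have hx : x ∉ xs.toFinset := fun hc => h (List.mem_toFinset.mp hc)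
    rw [List.toFinset_cons, Finset.sum_insert hx]
    have e1 : (x :: xs).count x = xs.count x + 1 := List.count_cons_self
    have e0 : xs.count x = 0 := List.count_eq_zero.mpr h
    have hcong : ∀ v ∈ xs.toFinset, (x :: xs).count v / 2 = xs.count v / 2 := by
      intro v hv
      have hne : v ≠ x := fun hc => hx (hc ▸ hv)
      simp [Ne.symm hne]
    rw [Finset.sum_congr rfl hcong, e1, e0]
    simp

lemma pvA_loop_eq (s : List (List Int)) :
    ((PySem.List.pyRange 0 (s.length : Int)).foldl
        (fun (st : List (Int × Int) × PySem.Set Int) i =>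
          if PySem.Set.contains st.2 i then st
          else pvInnerA s i (PySem.List.pyRange (i + 1) (s.length : Int)) st.1 st.2)
        ([], PySem.Set.empty)).1.length = pcnt s := by
  have h := pvOuter_spec s s.length 0 [] PySem.Set.empty (by omega)
  rw [h]
  simp only [List.length_nil, Nat.zero_add]
  have hfil : (PySem.List.pyRange 0 (s.length : Int)).filter
      (fun j => !(PySem.Set.contains PySem.Set.empty j)) = PySem.List.pyRange 0 (s.length : Int) := by
    apply List.filter_eq_self.mpr
    intro a _
    simp [PySem.Set.contains_eq_listContains, PySem.Set.empty]
  have hfv : pvFree s PySem.Set.empty (PySem.List.pyRange 0 (s.length : Int)) = s := by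
    rw [pvFree, hfil]
    simpa [PySem.List.len] using PySem.List.map_pyGetD_pyRange_zero s []
  rw [hfv]

lemma pvB_sum_eq (s : List (List Int)) :
    ((PySem.Dict.values (s.foldl
        (fun (d : PySem.Dict (List Int) Int) body => d.insert body (d.getD body 0 + 1))
        PySem.Dict.empty)).map (fun c => PySem.Int.floordiv c 2)).sum
      = ((pcnt s : Nat) : Int) := by
  rw [PySem.Dict.foldl_insert_getD_add_one_eq_counter]
  have hv : PySem.Dict.values (PySem.Dict.counter s)
      = (PySem.Set.ofList s).map (fun k => ((s.count k : Nat) : Int)) := by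
    simp [PySem.Dict.values, PySem.Dict.items_counter, List.map_map, Function.comp]
  rw [hv, List.map_map]
  have hfun : ((fun c => PySem.Int.floordiv c 2) ∘ fun k => ((s.count k : Nat) : Int))
      = fun k => (((s.count k / 2 : Nat)) : Int) := by
    funext k
    simp only [Function.comp]
    rw [PySem.Int.floordiv_eq_ediv_of_pos (by norm_num)]
    omega
  rw [hfun]
  have hsum : ((PySem.Set.ofList s).map (fun k => s.count k / 2)).sum = pcnt s := by
    rw [← List.sum_toFinset _ (PySem.Set.nodup_ofList s)]
    have hts : (PySem.Set.ofList s).toFinset = s.toFinset := by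
      ext v; simp [List.mem_toFinset, PySem.Set.mem_ofList]
    rw [hts, pcnt_eq_sum]
  calc ((PySem.Set.ofList s).map fun k => (((s.count k / 2 : Nat)) : Int)).sum
      = ((PySem.Set.ofList s).map (Nat.cast ∘ fun k => s.count k / 2)).sum := rfl
    _ = (((PySem.Set.ofList s).map (fun k => s.count k / 2)).map Nat.cast).sum := by
        rw [List.map_map]
    _ = (((PySem.Set.ofList s).map (fun k => s.count k / 2)).sum : Nat) := by
        rw [← Nat.cast_list_sum]
    _ = ((pcnt s : Nat) : Int) := by rw [hsum]

theorem is_ryanpeiko_spec' (bodies : List (List Int)) :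
    is_ryanpeiko bodies = is_ryanpeiko_alt bodies := by
  simp only [is_ryanpeiko, is_ryanpeiko_alt]
  rw [← List.foldl_filter]
  rw [pvB_sum_eq]
  set s := bodies.filter (fun body =>
    PySem.List.len body == 3 && !(PySem.List.pyGetD body 0 0 == PySem.List.pyGetD body 1 0)) with hs
  by_cases hlen : PySem.List.len s < 4
  · rw [if_pos hlen]
    have h4 : s.length < 4 := by
      simpa [PySem.List.len] using hlen
    have hle := pcnt_le s
    symm
    rw [beq_eq_false_iff_ne]
    intro e
    have : pcnt s = 2 := by exact_mod_cast e
    omega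
  · rw [if_neg hlen]
    simp only [PySem.List.len]
    rw [pvA_loop_eq s]

-- ===== VERDICT (by name: the statement is the Claim_ definition above) =====
theorem is_ryanpeiko_spec : Claim_equal_is_ryanpeiko := by
  intro bodies _
  unfold Spec_is_ryanpeiko
  exact is_ryanpeiko_spec' bodies
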